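-- pv_equiv track=rewrite | github.com/anshulsinghh/covid19 | algos.py | binary_pool
-- ===== SOURCE A (Python) =====
-- def binary_pool(arr):
--   # If the array is only length 1, return as we test it individually
--   if (len(arr) == 1):
--       return 1
--
--   # Stores the number of tests needed to test the pool
--   total_tests = 1
--
--   # Check if the given array tests positive for COVID-19 (this is why we start total_tests at 1)
--   if (tests_positive(arr)):
--
--     # Find the midpoint and the right/left partitions of the sample
--     mid = len(arr)//2
--     left_side = arr[0:mid]
--     right_side = arr[mid:]
--
--
--     # Test left side for COVID-19, and find individuals with COVID-19
--     if (tests_positive(left_side)):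
--       total_tests += binary_pool(left_side)
--
--     # Test right side for COVID-19 and find individuals with COVID-19
--     if (tests_positive(right_side)):
--       total_tests += binary_pool(right_side)
--
--     # Still increment the number of tests used, despite if either side did not
--     # test positive for COVID-19
--     if (not tests_positive(right_side)):
--         total_tests += 1
--
--     if (not tests_positive(left_side)):
--       total_tests += 1
--
--   return total_tests
--
-- def tests_positive(arr):
--   for i in arr:
--     if (i > 0):
--       return True
--   return False
-- ===== SOURCE B (Python) =====
-- def binary_pool(arr):
--     n = len(arr)
--     # prefix[i] = number of positive samples among arr[:i]  (O(1) positivity queries)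
--     prefix = [0]
--     c = 0
--     for v in arr:
--         c += 1 if v > 0 else 0
--         prefix.append(c)
--
--     def rec(lo, hi):
--         if hi - lo <= 1:
--             return 1
--         if prefix[hi] == prefix[lo]:
--             return 1
--         mid = lo + (hi - lo) // 2
--         left = rec(lo, mid) if prefix[mid] > prefix[lo] else 1
--         right = rec(mid, hi) if prefix[hi] > prefix[mid] else 1
--         return 1 + left + right
--
--     return rec(0, n)
-- ===== Notes on version B (the rewrite author's own statement) =====
-- stated objective: faster
-- what changed: Replaces A's repeated linear tests_positive scans and list slicing at every recursion level by a prefix count of positives built once, so each 'any positive in this segment' query is an O(1) index comparison and the recursion works on index pairs instead of copied sublists.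
import Mathlib
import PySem

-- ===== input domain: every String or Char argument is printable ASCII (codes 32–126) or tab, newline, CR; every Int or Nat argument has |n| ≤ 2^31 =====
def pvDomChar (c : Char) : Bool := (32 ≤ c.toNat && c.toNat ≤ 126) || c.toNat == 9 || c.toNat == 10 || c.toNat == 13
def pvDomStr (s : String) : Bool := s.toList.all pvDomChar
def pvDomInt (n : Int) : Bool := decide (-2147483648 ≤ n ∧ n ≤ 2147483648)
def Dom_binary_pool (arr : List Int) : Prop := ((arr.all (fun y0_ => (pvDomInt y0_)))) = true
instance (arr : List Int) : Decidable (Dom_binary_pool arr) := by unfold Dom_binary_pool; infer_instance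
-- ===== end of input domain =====

-- B replaces A's per-level linear positivity scans and list slicing by a prefix count of
-- positives built once, queried in O(1) by an index-based recursion (objective: faster).


-- ===== PORT A =====
-- Python's for-loop with early 'return True'
def tests_positive : List Int → Bool
  | [] => false
  | i :: rest => if i > 0 then true else tests_positive rest

-- mid = len(arr)//2; left_side = arr[0:mid]; right_side = arr[mid:]
-- (len(arr)//2 on the nonnegative length is exactly Nat division)
def leftHalf (arr : List Int) : List Int :=
  PySem.List.slice arr (some 0) (some ((arr.length / 2 : Nat) : Int))
def rightHalf (arr : List Int) : List Int :=
  PySem.List.slice arr (some ((arr.length / 2 : Nat) : Int)) none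

theorem leftHalf_eq (arr : List Int) : leftHalf arr = arr.take (arr.length / 2) := by
  rw [leftHalf, PySem.List.slice_zero_start, PySem.List.slice_to_natCast]
theorem rightHalf_eq (arr : List Int) : rightHalf arr = arr.drop (arr.length / 2) := by
  rw [rightHalf, PySem.List.slice_from_natCast]

theorem tests_positive_ne_nil {arr : List Int} (h : tests_positive arr = true) : arr ≠ [] := by
  intro hn; subst hn; simp [tests_positive] at h

-- termination lemmas for the recursion on the halves (cited in decreasing_by)
theorem leftHalf_len_lt (arr : List Int) (h2 : tests_positive arr = true)
    (h1 : arr.length ≠ 1) : (leftHalf arr).length < arr.length := by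
  have hne := tests_positive_ne_nil h2
  rw [leftHalf_eq]
  rcases arr with _ | ⟨x, xs⟩
  · exact absurd rfl hne
  · simp only [List.length_take, List.length_cons] at h1 ⊢; omega

theorem rightHalf_len_lt (arr : List Int) (h2 : tests_positive arr = true)
    (h1 : arr.length ≠ 1) : (rightHalf arr).length < arr.length := by
  have hne := tests_positive_ne_nil h2
  rw [rightHalf_eq]
  rcases arr with _ | ⟨x, xs⟩
  · exact absurd rfl hne
  · simp only [List.length_drop, List.length_cons] at h1 ⊢; omega

-- the four 'total_tests +=' statements become the four added if-terms, in A's order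
def binary_pool (arr : List Int) : Int :=
  if _h1 : arr.length = 1 then 1
  else if h2 : tests_positive arr = true then
    1 + (if tests_positive (leftHalf arr) then binary_pool (leftHalf arr) else 0)
      + (if tests_positive (rightHalf arr) then binary_pool (rightHalf arr) else 0)
      + (if !(tests_positive (rightHalf arr)) then 1 else 0)
      + (if !(tests_positive (leftHalf arr)) then 1 else 0)
  else 1
termination_by arr.length
decreasing_by
  · exact leftHalf_len_lt arr h2 _h1
  · exact rightHalf_len_lt arr h2 _h1

-- ===== PORT B =====
-- prefix = [0]; c = 0; for v in arr: c += 1 if v > 0 else 0; prefix.append(c)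
def bp_prefix (arr : List Int) : List Int :=
  (arr.foldl (fun (st : List Int × Int) v =>
      let c := st.2 + (if v > 0 then 1 else 0)
      (st.1 ++ [c], c)) ([0], 0)).1

-- termination lemmas for the index recursion (cited in decreasing_by)
theorem bp_mid_lt_left (lo hi : Nat) (h : ¬ hi - lo ≤ 1) :
    lo + (hi - lo) / 2 - lo < hi - lo := by omega
theorem bp_mid_lt_right (lo hi : Nat) (h : ¬ hi - lo ≤ 1) :
    hi - (lo + (hi - lo) / 2) < hi - lo := by omega

-- def rec(lo, hi): …  (closure over prefix; mid = lo + (hi - lo)//2 inlined)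
def bp_rec (P : List Int) (lo hi : Nat) : Int :=
  if hsm : hi - lo ≤ 1 then 1
  else if P.getD hi 0 = P.getD lo 0 then 1
  else
    1 + (if P.getD (lo + (hi - lo) / 2) 0 > P.getD lo 0 then bp_rec P lo (lo + (hi - lo) / 2) else 1)
      + (if P.getD hi 0 > P.getD (lo + (hi - lo) / 2) 0 then bp_rec P (lo + (hi - lo) / 2) hi else 1)
termination_by hi - lo
decreasing_by
  · exact bp_mid_lt_left lo hi hsm
  · exact bp_mid_lt_right lo hi hsm

def binary_pool_alt (arr : List Int) : Int :=
  bp_rec (bp_prefix arr) 0 arr.length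

-- ===== PRECONDITION & SPEC =====
def Spec_binary_pool (arr : List Int) (out : Int) : Prop := out = binary_pool_alt arr
instance (arr : List Int) (out : Int) : Decidable (Spec_binary_pool arr out) := by unfold Spec_binary_pool; infer_instance

-- ===== CLAIM (what is proved, stated in full; the proofs are below) =====
def Claim_equal_binary_pool : Prop := ∀ (arr : List Int), Dom_binary_pool arr → Spec_binary_pool arr (binary_pool arr)

-- ===== LEMMAS AND PROOFS =====

-- number of positive entries, as an Int
def countPos (xs : List Int) : Int := ((xs.filter (fun v => decide (0 < v))).length : Int)

theorem countPos_append (xs ys : List Int) : countPos (xs ++ ys) = countPos xs + countPos ys := by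
  simp [countPos]

theorem countPos_nonneg (xs : List Int) : 0 ≤ countPos xs := by
  simp [countPos]

theorem tests_positive_eq_any (xs : List Int) : tests_positive xs = xs.any (fun v => decide (0 < v)) := by
  induction xs with
  | nil => rfl
  | cons x xs ih => by_cases hx : x > 0 <;> simp [tests_positive, hx, ih]

theorem tests_positive_iff (xs : List Int) : tests_positive xs = true ↔ 0 < countPos xs := by
  rw [tests_positive_eq_any, countPos]
  simp only [List.any_eq_true, decide_eq_true_eq]
  rw [show (0:Int) < ((xs.filter (fun v => decide (0 < v))).length : Int)
        ↔ 0 < (xs.filter (fun v => decide (0 < v))).length from by exact_mod_cast Iff.rfl,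
      List.length_pos_iff]
  constructor
  · rintro ⟨x, hx, hp⟩
    intro hnil
    have : x ∈ xs.filter (fun v => decide (0 < v)) := by simp [List.mem_filter, hx, hp]
    simp [hnil] at this
  · intro h
    rcases List.exists_mem_of_ne_nil _ h with ⟨x, hx⟩
    rcases List.mem_filter.mp hx with ⟨h1, h2⟩
    exact ⟨x, h1, by simpa using h2⟩

theorem bp_prefix_spec (arr : List Int) :
    arr.foldl (fun (st : List Int × Int) v =>
      let c := st.2 + (if v > 0 then 1 else 0)
      (st.1 ++ [c], c)) ([0], 0)
    = ((List.range (arr.length + 1)).map (fun i => countPos (arr.take i)), countPos arr) := by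
  induction arr using List.reverseRecOn with
  | nil => simp [countPos]
  | append_singleton xs v ih =>
    rw [List.foldl_append, ih]
    simp only [List.foldl_cons, List.foldl_nil]
    have hc : countPos xs + (if v > 0 then (1:Int) else 0) = countPos (xs ++ [v]) := by
      rw [countPos_append]
      by_cases hv : v > 0 <;> simp [countPos, hv]
    rw [Prod.mk.injEq]
    refine ⟨?_, hc⟩
    rw [hc, List.length_append]
    simp only [List.length_cons, List.length_nil]
    conv_rhs => rw [List.range_succ, List.map_append]
    congr 1
    · refine List.map_congr_left (fun i hi => ?_)
      rw [List.take_append_of_le_length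
            (by simpa using Nat.lt_succ_iff.mp (List.mem_range.mp hi))]
    · simp only [List.map_cons, List.map_nil]
      rw [show xs.length + 1 = (xs ++ [v]).length by simp, List.take_length]

theorem bp_prefix_getD (arr : List Int) (i : Nat) (hi : i ≤ arr.length) :
    (bp_prefix arr).getD i 0 = countPos (arr.take i) := by
  unfold bp_prefix
  rw [bp_prefix_spec]
  simp only
  rw [List.getD_eq_getElem?_getD, List.getElem?_map, List.getElem?_range (by omega)]
  simp

-- countPos of the segment [lo, hi) via prefix counts
theorem countPos_segment (arr : List Int) (lo hi : Nat) (hlo : lo ≤ hi) (hhi : hi ≤ arr.length) :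
    countPos ((arr.drop lo).take (hi - lo)) = countPos (arr.take hi) - countPos (arr.take lo) := by
  have h : arr.take hi = arr.take lo ++ (arr.drop lo).take (hi - lo) := by
    rw [← List.take_add (l := arr) (i := lo) (j := hi - lo)]
    congr 1; omega
  rw [h, countPos_append]; ring

theorem countPos_take_mono (arr : List Int) (lo hi : Nat) (hlo : lo ≤ hi) (hhi : hi ≤ arr.length) :
    countPos (arr.take lo) ≤ countPos (arr.take hi) := by
  have h1 := countPos_nonneg ((arr.drop lo).take (hi - lo))
  have h2 := countPos_segment arr lo hi hlo hhi
  omega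

-- the core correspondence: the index recursion on the prefix array computes
-- A's result on the corresponding segment
theorem bp_rec_eq (arr : List Int) : ∀ n lo hi, hi - lo ≤ n → hi ≤ arr.length →
    bp_rec (bp_prefix arr) lo hi = binary_pool ((arr.drop lo).take (hi - lo)) := by
  intro n
  induction n with
  | zero =>
    intro lo hi h1 _
    have h0 : hi - lo = 0 := by omega
    rw [bp_rec, dif_pos (by omega), h0]
    simp [binary_pool, tests_positive]
  | succ n ih =>
    intro lo hi h1 h2
    by_cases hsmall : hi - lo ≤ 1
    · rw [bp_rec, dif_pos hsmall]
      rcases Nat.le_one_iff_eq_zero_or_eq_one.mp hsmall with h0 | h0 <;> rw [h0]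
      · simp [binary_pool, tests_positive]
      · have hlen : ((arr.drop lo).take 1).length = 1 := by
          simp; omega
        rw [binary_pool, dif_pos hlen]
    · -- segment has length ≥ 2
      set s := (arr.drop lo).take (hi - lo) with hs
      have hslen : s.length = hi - lo := by simp [hs]; omega
      have hcseg : countPos s = countPos (arr.take hi) - countPos (arr.take lo) :=
        countPos_segment arr lo hi (by omega) h2
      have hPhi := bp_prefix_getD arr hi h2
      have hPlo := bp_prefix_getD arr lo (by omega)
      by_cases hpos : countPos (arr.take hi) = countPos (arr.take lo)
      · -- no positive in the segment: both return 1
        rw [bp_rec, dif_neg hsmall, if_pos (by rw [hPhi, hPlo, hpos])]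
        have hnp : ¬ tests_positive s = true := by
          intro hc
          have := (tests_positive_iff s).mp hc
          omega
        rw [binary_pool, dif_neg (by omega), dif_neg hnp]
      · have hgt : countPos (arr.take lo) < countPos (arr.take hi) := by
          have := countPos_take_mono arr lo hi (by omega) h2
          omega
        have hspos : tests_positive s = true := (tests_positive_iff s).mpr (by omega)
        rw [bp_rec, dif_neg hsmall, if_neg (by rw [hPhi, hPlo]; omega)]
        set mid := lo + (hi - lo) / 2 with hmid
        have hmid1 : lo < mid := by omega
        have hmid2 : mid < hi := by omega
        have hPmid := bp_prefix_getD arr mid (by omega)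
        rw [binary_pool, dif_neg (by omega), dif_pos hspos]
        -- identify A's left/right slices with the index segments
        have hlh : leftHalf s = (arr.drop lo).take (mid - lo) := by
          rw [leftHalf_eq, hs, List.take_take]
          congr 1
          rw [hslen]
          omega
        have hrh : rightHalf s = (arr.drop mid).take (hi - mid) := by
          rw [rightHalf_eq, hs, List.drop_take, List.drop_drop]
          congr 1 <;> rw [hslen] <;> omega
        have hcl : countPos ((arr.drop lo).take (mid - lo))
            = countPos (arr.take mid) - countPos (arr.take lo) :=
          countPos_segment arr lo mid (by omega) (by omega)
        have hcr : countPos ((arr.drop mid).take (hi - mid))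
            = countPos (arr.take hi) - countPos (arr.take mid) :=
          countPos_segment arr mid hi (by omega) h2
        have hleq : (tests_positive ((arr.drop lo).take (mid - lo)) = true)
            ↔ (bp_prefix arr).getD mid 0 > (bp_prefix arr).getD lo 0 := by
          rw [tests_positive_iff, hcl, hPmid, hPlo]; omega
        have hreq : (tests_positive ((arr.drop mid).take (hi - mid)) = true)
            ↔ (bp_prefix arr).getD hi 0 > (bp_prefix arr).getD mid 0 := by
          rw [tests_positive_iff, hcr, hPhi, hPmid]; omega
        have ihl := ih lo mid (by omega) (by omega)
        have ihr := ih mid hi (by omega) h2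
        rw [hlh, hrh]
        by_cases hL : tests_positive ((arr.drop lo).take (mid - lo)) = true <;>
          by_cases hR : tests_positive ((arr.drop mid).take (hi - mid)) = true
        · rw [if_pos (hleq.mp hL), if_pos (hreq.mp hR), ihl, ihr]
          simp only [hL, hR, if_pos, Bool.not_true, Bool.false_eq_true, if_false, if_true]
          ring
        · rw [if_pos (hleq.mp hL), if_neg (fun h => hR (hreq.mpr h)), ihl]
          simp only [hL, Bool.not_eq_true] at hR
          simp only [hL, hR, Bool.not_true, Bool.not_false, Bool.false_eq_true, if_false, if_true]
          ring
        · rw [if_neg (fun h => hL (hleq.mpr h)), if_pos (hreq.mp hR), ihr]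
          simp only [Bool.not_eq_true] at hL
          simp only [hL, hR, Bool.not_true, Bool.not_false, Bool.false_eq_true, if_false, if_true]
          ring
        · rw [if_neg (fun h => hL (hleq.mpr h)), if_neg (fun h => hR (hreq.mpr h))]
          simp only [Bool.not_eq_true] at hL hR
          simp only [hL, hR, Bool.not_false, Bool.false_eq_true, if_false, if_true]
          ring

-- ===== VERDICT (by name: the statement is the Claim_ definition above) =====
theorem binary_pool_spec : Claim_equal_binary_pool := by
  intro arr _
  unfold Spec_binary_pool binary_pool_alt
  rw [bp_rec_eq arr arr.length 0 arr.length (by omega) (by omega)]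
  simp
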